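-- pv_equiv track=rewrite | github.com/Hugo-Gardes/Algorithmie | exercise_1/exercise_1.py | parcoursOnSQR
-- ===== SOURCE A (Python) =====
-- def parcoursOnSQR(gL):
--     l = sorted(gL.copy())
--     currentIndex = l.index(min(l, key=lambda x: (abs(x), -x)))
--     currentVar = l[currentIndex]
--     finalList = [currentVar]
--     nextVar = 2147483647
--     precedVar = -2147483648
--
--     while len(l) > 1:
--         if currentIndex + 1 < len(l):
--             nextVar = l[currentIndex + 1]
--             if currentIndex > 0:
--                 precedVar = l[currentIndex - 1]
--                 if abs(precedVar - currentVar) < abs(nextVar - currentVar):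
--                     currentVar = precedVar
--                     l.pop(currentIndex)
--                     currentIndex = currentIndex - 1
--                 else:
--                     currentVar = nextVar
--                     l.pop(currentIndex)
--                     currentIndex = currentIndex
--             else:
--                 currentVar = nextVar
--                 l.pop(currentIndex)
--                 currentIndex = currentIndex
--         else:
--             currentVar = precedVar
--             l.pop(currentIndex)
--             currentIndex = currentIndex - 1
--         finalList.append(l[currentIndex])
--     return finalList
-- ===== SOURCE B (Python) =====
-- def parcoursOnSQR(gL):
--     l = sorted(gL)
--     cur = min(l, key=lambda x: (abs(x), -x))
--     i = l.index(cur)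
--     left = l[:i]             # ascending; nearest remaining neighbour at the end
--     right = l[i + 1:][::-1]  # descending; nearest remaining neighbour at the end
--     out = [cur]
--     while left or right:
--         if not right or (left and abs(left[-1] - cur) < abs(right[-1] - cur)):
--             cur = left.pop()
--         else:
--             cur = right.pop()
--         out.append(cur)
--     return out
-- ===== Notes on version B (the rewrite author's own statement) =====
-- stated objective: faster
-- what changed: A repeatedly pops the current element out of one shrinking sorted list and re-reads neighbours through a moving index (each pop shifts the tail, O(n) per step); B sorts once, splits the sorted list at the element nearest zero into two stacks (left part ascending, right part reversed) and merges them outward, popping the closer stack top in O(1) per step.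
import Mathlib
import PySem

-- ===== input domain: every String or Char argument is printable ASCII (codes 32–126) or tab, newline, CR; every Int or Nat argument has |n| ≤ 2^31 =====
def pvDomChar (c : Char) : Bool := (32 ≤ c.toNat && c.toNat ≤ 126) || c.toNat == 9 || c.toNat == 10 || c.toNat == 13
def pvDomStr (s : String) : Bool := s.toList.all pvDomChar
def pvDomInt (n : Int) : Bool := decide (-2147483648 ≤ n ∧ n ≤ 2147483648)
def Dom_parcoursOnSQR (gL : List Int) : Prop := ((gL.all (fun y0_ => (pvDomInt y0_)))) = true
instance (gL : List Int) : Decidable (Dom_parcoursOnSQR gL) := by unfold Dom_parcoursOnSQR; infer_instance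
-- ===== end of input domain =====

-- B replaces A's quadratic pop-and-reindex walk over one shrinking list by a linear outward
-- two-stack merge after the same sort (return value only; neither program mutates its argument).

-- ===== PORT A =====
-- the while-loop of A: state (l, currentIndex, currentVar, precedVar, nextVar, finalList);
-- every `none` branch is a totality guard on an out-of-range access (Python would raise there;
-- unreachable from A's entry, which keeps currentIndex in range)
def parcoursOnSQRloop (l : List Int) (currentIndex : Int) (currentVar precedVar nextVar : Int)
    (finalList : List Int) : List Int :=
  if 1 < l.length then
    if currentIndex + 1 < (l.length : Int) then
      match PySem.List.pyGet? l (currentIndex + 1) with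
      | none => finalList
      | some nv =>
        if 0 < currentIndex then
          match PySem.List.pyGet? l (currentIndex - 1) with
          | none => finalList
          | some pv =>
            if |pv - currentVar| < |nv - currentVar| then
              match hp : PySem.List.pop? l currentIndex with
              | none => finalList
              | some r =>
                match PySem.List.pyGet? r.2 (currentIndex - 1) with
                | none => finalList
                | some a => parcoursOnSQRloop r.2 (currentIndex - 1) pv pv nv (finalList ++ [a])
            else
              match hp : PySem.List.pop? l currentIndex with
              | none => finalList
              | some r =>
                match PySem.List.pyGet? r.2 currentIndex with
                | none => finalList
                | some a => parcoursOnSQRloop r.2 currentIndex nv pv nv (finalList ++ [a])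
        else
          match hp : PySem.List.pop? l currentIndex with
          | none => finalList
          | some r =>
            match PySem.List.pyGet? r.2 currentIndex with
            | none => finalList
            | some a => parcoursOnSQRloop r.2 currentIndex nv precedVar nv (finalList ++ [a])
    else
      match hp : PySem.List.pop? l currentIndex with
      | none => finalList
      | some r =>
        match PySem.List.pyGet? r.2 (currentIndex - 1) with
        | none => finalList
        | some a => parcoursOnSQRloop r.2 (currentIndex - 1) precedVar precedVar nextVar (finalList ++ [a])
  else finalList
termination_by l.length
decreasing_by
  all_goals
    have := PySem.List.length_of_pop?_eq_some l hp
    omega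

def parcoursOnSQR (gL : List Int) : List Int :=
  let l := PySem.List.sorted gL (fun x => x) false
  -- min(l, key=lambda x: (abs(x), -x)); none = ValueError on the empty list (excluded by Pre_)
  match PySem.List.min2? l (fun x => |x|) (fun x => -x) with
  | none => []
  | some m =>
    match PySem.List.index? l m with
    | none => []  -- unreachable guard: the minimum is an element of l
    | some currentIndex =>
      match PySem.List.pyGet? l (currentIndex : Int) with
      | none => []  -- unreachable guard
      | some currentVar =>
        parcoursOnSQRloop l (currentIndex : Int) currentVar (-2147483648) 2147483647 [currentVar]

-- ===== PORT B =====
-- the while-loop of B: `left` ascending, `right` stored reversed (descending); both popped at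
-- the end (left[-1] / right[-1]); getLastD 0 is left[-1], read only when that list is nonempty
def parcoursOnSQRaltLoop (left right : List Int) (cur : Int) (out : List Int) : List Int :=
  if left.isEmpty && right.isEmpty then out
  else if right.isEmpty || (!left.isEmpty && decide (|left.getLastD 0 - cur| < |right.getLastD 0 - cur|)) then
    parcoursOnSQRaltLoop left.dropLast right (left.getLastD 0) (out ++ [left.getLastD 0])
  else
    parcoursOnSQRaltLoop left right.dropLast (right.getLastD 0) (out ++ [right.getLastD 0])
termination_by left.length + right.length
decreasing_by
  · have hl : left ≠ [] := by
      rename_i h1 h2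
      intro hc
      subst hc
      rcases Bool.or_eq_true _ _ |>.mp h2 with h | h
      · simp [List.isEmpty_iff.mp h] at h1
      · simp at h
    have : 0 < left.length := List.length_pos_iff.mpr hl
    simp only [List.length_dropLast]; omega
  · have hr : right ≠ [] := by
      rename_i h1 h2
      intro hc
      simp [hc] at h2
    have : 0 < right.length := List.length_pos_iff.mpr hr
    simp only [List.length_dropLast]; omega

def parcoursOnSQR_alt (gL : List Int) : List Int :=
  let l := PySem.List.sorted gL (fun x => x) false
  match PySem.List.min2? l (fun x => |x|) (fun x => -x) with
  | none => []  -- ValueError on the empty list (excluded by Pre_)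
  | some cur =>
    match PySem.List.index? l cur with
    | none => []  -- unreachable guard: the minimum is an element of l
    | some i =>
      let left := PySem.List.slice l none (some (i : Int))                    -- l[:i]
      let right := (PySem.List.slice l (some ((i : Int) + 1)) none).reverse   -- l[i+1:][::-1]
      parcoursOnSQRaltLoop left right cur [cur]

-- ===== PRECONDITION & SPEC =====
-- Pre_ excludes only the empty list, on which A raises ValueError (min of an empty sequence)
def Pre_parcoursOnSQR (gL : List Int) : Prop := gL ≠ []
instance (gL : List Int) : Decidable (Pre_parcoursOnSQR gL) := by unfold Pre_parcoursOnSQR; infer_instance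
def pvWitness_parcoursOnSQR : List Int := [3, -1, 4, 1, -5]

def Spec_parcoursOnSQR (gL : List Int) (out : List Int) : Prop := out = parcoursOnSQR_alt gL
instance (gL : List Int) (out : List Int) : Decidable (Spec_parcoursOnSQR gL out) := by unfold Spec_parcoursOnSQR; infer_instance

-- ===== CLAIM (what is proved, stated in full; the proofs are below) =====
def Claim_equal_parcoursOnSQR : Prop := ∀ (gL : List Int), Dom_parcoursOnSQR gL → Pre_parcoursOnSQR gL → Spec_parcoursOnSQR gL (parcoursOnSQR gL)

-- ===== LEMMAS AND PROOFS =====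

lemma eraseIdx_append_cons (l r : List Int) (e : Int) :
    (l ++ e :: r).eraseIdx l.length = l ++ r := by
  induction l with
  | nil => simp
  | cons a t ih => simp [ih]

-- a fold that at each step keeps its accumulator or takes the new element
lemma foldl_some_mem {f : Option Int → Int → Option Int}
    (hf : ∀ m0 x, f (some m0) x = some m0 ∨ f (some m0) x = some x) :
    ∀ (t : List Int) (m0 : Int), ∃ m, List.foldl f (some m0) t = some m ∧ (m = m0 ∨ m ∈ t) := by
  intro t
  induction t with
  | nil => intro m0; exact ⟨m0, rfl, Or.inl rfl⟩
  | cons x t ih =>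
    intro m0
    rcases hf m0 x with h | h
    · obtain ⟨m, hm, hmem⟩ := ih m0
      exact ⟨m, by simp only [List.foldl_cons, h, hm], by rcases hmem with h' | h' <;> simp [h']⟩
    · obtain ⟨m, hm, hmem⟩ := ih x
      exact ⟨m, by simp only [List.foldl_cons, h, hm], by rcases hmem with h' | h' <;> simp [h']⟩

lemma min2?_some_mem (l : List Int) (hl : l ≠ []) :
    ∃ m ∈ l, PySem.List.min2? l (fun x => |x|) (fun x => -x) = some m := by
  rcases l with _ | ⟨x, t⟩
  · exact absurd rfl hl
  · obtain ⟨m, hm, hmem⟩ := foldl_some_mem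
      (f := fun acc y => match acc with
        | none => some y
        | some m =>
          if (decide (|y| < |m|) || !decide (|m| < |y|) && decide (-y < -m)) = true
          then some y else some m)
      (by intro m0 y; simp only; split_ifs <;> simp) t x
    refine ⟨m, ?_, ?_⟩
    · rcases hmem with h | h <;> simp [h]
    · rw [show (PySem.List.min2? (x :: t) (fun x => |x|) fun x => -x)
          = List.foldl (fun acc y => match acc with
              | none => some y
              | some m =>
                if (decide (|y| < |m|) || !decide (|m| < |y|) && decide (-y < -m)) = true
                then some y else some m) (some x) t by
        unfold PySem.List.min2?
        rw [List.foldl_cons]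
        congr 1
        funext acc y
        cases acc <;> rfl]
      exact hm

-- with nothing on the right, B's loop drains `left` back-to-front, whatever `cur` is
lemma altLoop_nil_right (left : List Int) (cur : Int) (out : List Int) :
    parcoursOnSQRaltLoop left [] cur out = out ++ left.reverse := by
  induction left using List.reverseRecOn generalizing cur out with
  | nil => rw [parcoursOnSQRaltLoop]; simp
  | append_singleton t a ih =>
    rw [parcoursOnSQRaltLoop]
    rw [if_neg (by simp), if_pos (by simp)]
    rw [List.getLastD_concat, List.dropLast_concat, ih]
    simp

-- the bridge: A's loop on the remaining list `left ++ e :: right` with the cursor on `e`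
-- equals B's loop on the two stacks; `e = cur` is only needed while `right` is nonempty
lemma loop_bridge : ∀ (n : Nat) (left : List Int) (e : Int) (right : List Int)
    (cur p nx : Int) (acc : List Int),
    left.length + right.length = n → (right ≠ [] → e = cur) →
    parcoursOnSQRloop (left ++ e :: right) (left.length : Int) cur p nx acc
      = parcoursOnSQRaltLoop left right.reverse cur acc := by
  intro n
  induction n using Nat.strong_induction_on with
  | _ n IH =>
  intro left e right cur p nx acc hn hcur
  have hpop : PySem.List.pop? (left ++ e :: right) (left.length : Int) = some (e, left ++ right) := by
    rw [PySem.List.pop?_natCast (left ++ e :: right) left.length (by simp)]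
    have h1 : (left ++ e :: right)[left.length]'(by simp) = e := List.getElem_of_append rfl rfl
    rw [eraseIdx_append_cons, h1]
  rcases right with _ | ⟨nx0, right'⟩
  · -- right empty: A is in drain-left mode, B pops only from `left`
    rcases left.eq_nil_or_concat with rfl | ⟨left', pv, hL⟩
    · rw [parcoursOnSQRloop, parcoursOnSQRaltLoop]; simp
    · rw [List.concat_eq_append] at hL; subst hL
      rw [parcoursOnSQRloop]
      rw [if_pos (by simp only [List.length_append, List.length_cons, List.length_nil]; omega),
          if_neg (by simp only [List.length_append, List.length_cons, List.length_nil]; push_cast; omega)]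
      rw [hpop]; simp only
      have hidx : ((left' ++ [pv]).length : Int) - 1 = (left'.length : Int) := by simp
      rw [List.append_nil, hidx]
      have hget : PySem.List.pyGet? (left' ++ [pv]) ((left'.length : Nat) : Int) = some pv :=
        PySem.List.pyGet?_append_length left' [] pv
      rw [hget]; simp only
      have hrec := IH left'.length (by simp at hn; omega) left' pv [] p p nx (acc ++ [pv])
        (by simp) (fun h => absurd rfl h)
      simp only at hrec
      rw [hrec, List.reverse_nil, altLoop_nil_right]
      -- B side
      rw [parcoursOnSQRaltLoop]
      rw [if_neg (by simp), if_pos (by simp)]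
      rw [List.getLastD_concat, List.dropLast_concat, altLoop_nil_right]
  · -- right = nx0 :: right' : the cursor value is live, e = cur
    obtain rfl : e = cur := hcur (by simp)
    rw [parcoursOnSQRloop]
    rw [if_pos (by simp only [List.length_append, List.length_cons]; omega),
        if_pos (by simp only [List.length_append, List.length_cons]; push_cast; omega)]
    have hnext : PySem.List.pyGet? (left ++ e :: nx0 :: right') ((left.length : Int) + 1) = some nx0 := by
      have h := PySem.List.pyGet?_append_right left (e :: nx0 :: right') 1
      simpa using h
    rw [hnext]; simp only
    rcases left.eq_nil_or_concat with rfl | ⟨left', pv, hL⟩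
    · -- left edge: always move right
      rw [if_neg (by simp)]
      rw [hpop]; simp only
      have hget : PySem.List.pyGet? ([] ++ nx0 :: right') ((List.length ([] : List Int) : Nat) : Int) = some nx0 :=
        PySem.List.pyGet?_append_length [] right' nx0
      rw [hget]; simp only
      have hrec := IH right'.length (by simp at hn; omega) [] nx0 right' nx0 p nx0
        (acc ++ [nx0]) (by simp) (fun _ => rfl)
      rw [hrec]
      -- B side
      have hB : parcoursOnSQRaltLoop [] (nx0 :: right').reverse e acc
          = parcoursOnSQRaltLoop [] right'.reverse nx0 (acc ++ [nx0]) := by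
        rw [parcoursOnSQRaltLoop]
        rw [if_neg (by simp), if_neg (by simp)]
        rw [List.reverse_cons, List.getLastD_concat, List.dropLast_concat]
      rw [hB]
    · rw [List.concat_eq_append] at hL; subst hL
      -- interior: compare the two neighbours
      rw [if_pos (by simp only [List.length_append, List.length_cons]; push_cast; omega)]
      have hprec : PySem.List.pyGet? ((left' ++ [pv]) ++ e :: nx0 :: right')
          (((left' ++ [pv]).length : Int) - 1) = some pv := by
        rw [show ((left' ++ [pv]).length : Int) - 1 = (left'.length : Int) by simp]
        rw [show (left' ++ [pv]) ++ e :: nx0 :: right' = left' ++ pv :: (e :: nx0 :: right') by simp]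
        exact PySem.List.pyGet?_append_length ..
      rw [hprec]; simp only
      by_cases hcmp : |pv - e| < |nx0 - e|
      · -- move left
        rw [if_pos hcmp, hpop]; simp only
        rw [show ((left' ++ [pv]).length : Int) - 1 = (left'.length : Int) by simp]
        have hget : PySem.List.pyGet? ((left' ++ [pv]) ++ nx0 :: right') ((left'.length : Nat) : Int) = some pv := by
          rw [show (left' ++ [pv]) ++ nx0 :: right' = left' ++ pv :: (nx0 :: right') by simp]
          exact PySem.List.pyGet?_append_length ..
        rw [hget]; simp only
        have hrec := IH (left'.length + (nx0 :: right').length) (by simp at hn ⊢; omega)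
          left' pv (nx0 :: right') pv pv nx0 (acc ++ [pv]) rfl (fun _ => rfl)
        rw [show (left' ++ [pv]) ++ nx0 :: right' = left' ++ pv :: (nx0 :: right') by simp, hrec]
        -- B side
        have hB : parcoursOnSQRaltLoop (left' ++ [pv]) ((nx0 :: right').reverse) e acc
            = parcoursOnSQRaltLoop left' (nx0 :: right').reverse pv (acc ++ [pv]) := by
          rw [parcoursOnSQRaltLoop]
          rw [if_neg (by simp), if_pos (by
            simp [List.reverse_cons, hcmp])]
          rw [List.getLastD_concat, List.dropLast_concat]
        rw [hB]
      · -- move right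
        rw [if_neg hcmp, hpop]; simp only
        have hget : PySem.List.pyGet? ((left' ++ [pv]) ++ nx0 :: right')
            (((left' ++ [pv]).length : Nat) : Int) = some nx0 :=
          PySem.List.pyGet?_append_length ..
        rw [hget]; simp only
        have hrec := IH ((left' ++ [pv]).length + right'.length) (by simp at hn ⊢; omega)
          (left' ++ [pv]) nx0 right' nx0 pv nx0 (acc ++ [nx0]) rfl (fun _ => rfl)
        rw [hrec]
        -- B side
        have hB : parcoursOnSQRaltLoop (left' ++ [pv]) ((nx0 :: right').reverse) e acc
            = parcoursOnSQRaltLoop (left' ++ [pv]) right'.reverse nx0 (acc ++ [nx0]) := by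
          rw [parcoursOnSQRaltLoop]
          rw [if_neg (by simp), if_neg (by
            simp [List.reverse_cons, hcmp])]
          rw [List.reverse_cons, List.getLastD_concat, List.dropLast_concat]
        rw [hB]

-- ===== VERDICT (by name: the statement is the Claim_ definition above) =====
theorem parcoursOnSQR_spec : Claim_equal_parcoursOnSQR := by
  intro gL _ hpre
  unfold Spec_parcoursOnSQR parcoursOnSQR parcoursOnSQR_alt
  simp only
  have hl : PySem.List.sorted gL (fun x => x) false ≠ [] := by
    intro h
    exact hpre ((PySem.List.sorted_eq_nil_iff gL (fun x => x) false).mp h)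
  obtain ⟨m, hmem, hmin⟩ := min2?_some_mem _ hl
  rw [hmin]; simp only
  obtain ⟨i, hi⟩ := Option.isSome_iff_exists.mp ((PySem.List.index?_isSome_iff _ m).mpr hmem)
  rw [hi]; simp only
  obtain ⟨pre, suf, hsplit, hlen, -⟩ :=
    (PySem.List.index?_eq_some_iff (PySem.List.sorted gL (fun x => x) false) m i).mp hi
  have hget : PySem.List.pyGet? (PySem.List.sorted gL (fun x => x) false) ((i : Nat) : Int) = some m := by
    rw [hsplit, ← hlen]; exact PySem.List.pyGet?_append_length ..
  rw [hget]; simp only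
  have hleft : PySem.List.slice (PySem.List.sorted gL (fun x => x) false) none (some ((i : Nat) : Int)) = pre := by
    rw [PySem.List.slice_to_natCast, hsplit, ← hlen, List.take_left]
  have hright : PySem.List.slice (PySem.List.sorted gL (fun x => x) false) (some (((i : Nat) : Int) + 1)) none = suf := by
    rw [PySem.List.slice_from _ (by positivity)]
    rw [show (((i : Nat) : Int) + 1).toNat = i + 1 by omega]
    rw [hsplit, ← hlen]
    rw [show pre ++ m :: suf = (pre ++ [m]) ++ suf by simp]
    rw [show pre.length + 1 = (pre ++ [m]).length by simp]
    exact List.drop_left ..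
  rw [hleft, hright]
  have hb := loop_bridge (pre.length + suf.length) pre m suf m (-2147483648) 2147483647 [m] rfl
    (fun _ => rfl)
  rw [hsplit, ← hlen]
  exact hb
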